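-- pv_equiv track=rewrite | github.com/charansai1432/Python-DSA | sliding window/variable/freq_map/count_subarrays_where_max_minus_min_gt_k.py | count_at_most_k
-- ===== SOURCE A (Python) =====
-- from collections import deque
--
-- def count_at_most_k(arr, k):
--     max_dq = deque()
--     min_dq = deque()
--
--     l = 0
--     count = 0
--
--     for r in range(len(arr)):
--
--         while max_dq and arr[max_dq[-1]] < arr[r]:
--             max_dq.pop()
--         max_dq.append(r)
--
--         while min_dq and arr[min_dq[-1]] > arr[r]:
--             min_dq.pop()
--         min_dq.append(r)
--
--         while arr[max_dq[0]] - arr[min_dq[0]] > k: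
--
--             if max_dq[0] == l:
--                 max_dq.popleft()
--             if min_dq[0] == l:
--                 min_dq.popleft()
--
--             l += 1
--
--         count += (r - l + 1)
--
--     return count
-- ===== SOURCE B (Python) =====
-- def count_at_most_k(arr, k):
--     count = 0
--     l = 0
--     for r in range(len(arr)):
--         while max(arr[l:r+1]) - min(arr[l:r+1]) > k:
--             l += 1
--         count += r - l + 1
--     return count
-- ===== Notes on version B (the rewrite author's own statement) =====
-- stated objective: simpler
-- what changed: Keeps the two-pointer sweep but drops both monotonic index deques entirely: the window's max and min are recomputed directly from the slice arr[l:r+1], so all deque maintenance logic disappears.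
import Mathlib
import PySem

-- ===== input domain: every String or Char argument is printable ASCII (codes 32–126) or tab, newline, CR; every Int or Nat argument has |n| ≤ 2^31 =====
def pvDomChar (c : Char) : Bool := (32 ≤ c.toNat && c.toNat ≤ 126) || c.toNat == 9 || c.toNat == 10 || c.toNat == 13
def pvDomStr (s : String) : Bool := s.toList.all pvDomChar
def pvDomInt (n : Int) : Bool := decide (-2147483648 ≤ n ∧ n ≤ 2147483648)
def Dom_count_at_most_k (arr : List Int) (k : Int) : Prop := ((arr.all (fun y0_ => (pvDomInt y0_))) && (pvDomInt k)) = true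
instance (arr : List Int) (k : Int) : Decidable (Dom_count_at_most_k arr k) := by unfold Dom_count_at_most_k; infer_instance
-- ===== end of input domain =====

-- B replaces A's two monotonic index deques by recomputing the window's max/min from the
-- slice arr[l:r+1] inside the same two-pointer sweep (objective: simpler; not faster).

-- ===== PORT A =====
-- 'while max_dq and arr[max_dq[-1]] < arr[r]: max_dq.pop()' — run on the REVERSED deque
-- (deque indices are loop counters, always in range, so arr[i] is arr.getD i 0; exact there)
def pvPopRev (arr : List Int) (x : Int) (lt : Int → Int → Bool) : List Nat → List Nat
  | [] => []
  | i :: t => if lt (arr.getD i 0) x then pvPopRev arr x lt t else i :: t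

-- 'while arr[max_dq[0]] - arr[min_dq[0]] > k: …' — fuel-bounded (fuel r+1 suffices inside
-- Pre_); deque[0] on an empty deque raises IndexError in Python — only outside Pre_ —
-- modelled here by headD 0
def pvShrinkA (arr : List Int) (k : Int) : Nat → List Nat → List Nat → Nat → List Nat × List Nat × Nat
  | 0, maxd, mind, l => (maxd, mind, l)
  | fuel+1, maxd, mind, l =>
    if arr.getD (maxd.headD 0) 0 - arr.getD (mind.headD 0) 0 > k then
      pvShrinkA arr k fuel
        (if maxd.headD 0 = l then maxd.tail else maxd)
        (if mind.headD 0 = l then mind.tail else mind)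
        (l+1)
    else (maxd, mind, l)

def count_at_most_k (arr : List Int) (k : Int) : Int :=
  ((List.range arr.length).foldl
    (fun (st : List Nat × List Nat × Nat × Int) r =>
      let maxd := (pvPopRev arr (arr.getD r 0) (fun a b => decide (a < b)) st.1.reverse).reverse ++ [r]
      let mind := (pvPopRev arr (arr.getD r 0) (fun a b => decide (b < a)) st.2.1.reverse).reverse ++ [r]
      let s := pvShrinkA arr k (r+1) maxd mind st.2.2.1
      (s.1, s.2.1, s.2.2, st.2.2.2 + ((r : Int) - (s.2.2 : Int) + 1)))
    ([], [], 0, 0)).2.2.2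

-- ===== PORT B =====
-- 'while max(arr[l:r+1]) - min(arr[l:r+1]) > k: l += 1' — fuel-bounded (fuel r+1 suffices
-- inside Pre_); max/min of an empty slice raise ValueError in Python — only outside Pre_ —
-- modelled by .getD 0
def pvShrinkB (arr : List Int) (k : Int) : Nat → Nat → Nat → Nat
  | 0, l, _ => l
  | fuel+1, l, r =>
    let w := PySem.List.slice arr (some (l : Int)) (some ((r : Int) + 1))
    if (PySem.List.max? w (fun y => y)).getD 0 - (PySem.List.min? w (fun y => y)).getD 0 > k then
      pvShrinkB arr k fuel (l+1) r
    else l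

def count_at_most_k_alt (arr : List Int) (k : Int) : Int :=
  ((List.range arr.length).foldl
    (fun (st : Nat × Int) r =>
      let l := pvShrinkB arr k (r+1) st.1 r
      (l, st.2 + ((r : Int) - (l : Int) + 1)))
    (0, 0)).2

-- ===== PRECONDITION & SPEC =====
-- Pre_ excludes only inputs where the Python A RAISES: for k < 0 on a nonempty arr no window
-- (not even a singleton) satisfies max-min ≤ k, the shrink loop empties both deques and
-- A raises IndexError (B raises ValueError there for the same reason).
def Pre_count_at_most_k (arr : List Int) (k : Int) : Prop := arr = [] ∨ 0 ≤ k
instance (arr : List Int) (k : Int) : Decidable (Pre_count_at_most_k arr k) := by unfold Pre_count_at_most_k; infer_instance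
def pvWitness_count_at_most_k : List Int × Int := ([1, 3, 2, 5], 1)

def Spec_count_at_most_k (arr : List Int) (k : Int) (out : Int) : Prop := out = count_at_most_k_alt arr k
instance (arr : List Int) (k : Int) (out : Int) : Decidable (Spec_count_at_most_k arr k out) := by unfold Spec_count_at_most_k; infer_instance

-- ===== CLAIM (what is proved, stated in full; the proofs are below) =====
def Claim_equal_count_at_most_k : Prop := ∀ (arr : List Int) (k : Int), Dom_count_at_most_k arr k → Pre_count_at_most_k arr k → Spec_count_at_most_k arr k (count_at_most_k arr k)

-- ===== LEMMAS AND PROOFS =====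

-- index i survives in the deque for window end r iff no later j ≤ r beats it
def pvGood (arr : List Int) (lt : Int → Int → Bool) (r i : Nat) : Bool :=
  (List.range' (i+1) (r - i)).all fun j => !(lt (arr.getD i 0) (arr.getD j 0))

-- the canonical content of a monotonic deque for window [l, r]
def pvCand (arr : List Int) (lt : Int → Int → Bool) (l r : Nat) : List Nat :=
  (List.range' l (r + 1 - l)).filter (pvGood arr lt r)

-- the window arr[l:r+1]
def pvWin (arr : List Int) (l r : Nat) : List Int :=
  PySem.List.slice arr (some (l : Int)) (some ((r : Int) + 1))

lemma pvGood_iff (arr : List Int) (lt : Int → Int → Bool) (r i : Nat) :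
    pvGood arr lt r i = true ↔ ∀ j, i < j → j ≤ r → lt (arr.getD i 0) (arr.getD j 0) = false := by
  simp only [pvGood, List.all_eq_true, List.mem_range'_1, Bool.not_eq_eq_eq_not, Bool.not_true]
  constructor
  · intro h j h1 h2; exact h j ⟨by omega, by omega⟩
  · intro h j hj; exact h j (by omega) (by omega)

lemma pvGood_self (arr : List Int) (lt : Int → Int → Bool) (r : Nat) :
    pvGood arr lt r r = true := by
  simp [pvGood]

lemma mem_pvCand (arr : List Int) (lt : Int → Int → Bool) (l r i : Nat) (h : l ≤ r) :
    i ∈ pvCand arr lt l r ↔ l ≤ i ∧ i ≤ r ∧ pvGood arr lt r i = true := by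
  simp only [pvCand, List.mem_filter, List.mem_range'_1]
  constructor
  · rintro ⟨⟨h1, h2⟩, h3⟩; exact ⟨h1, by omega, h3⟩
  · rintro ⟨h1, h2, h3⟩; exact ⟨⟨h1, by omega⟩, h3⟩

lemma pvCand_self (arr : List Int) (lt : Int → Int → Bool) (l : Nat) :
    pvCand arr lt l l = [l] := by
  simp [pvCand, pvGood_self]

lemma pvCand_pairwise (arr : List Int) (lt : Int → Int → Bool) (l r : Nat) :
    (pvCand arr lt l r).Pairwise (fun i j => lt (arr.getD i 0) (arr.getD j 0) = false) := by
  have hlt : (pvCand arr lt l r).Pairwise (· < ·) :=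
    (List.pairwise_lt_range' ..).filter _
  refine hlt.imp_of_mem ?_
  intro i j hi hj hij
  rcases (List.mem_filter.mp hi) with ⟨hir, hig⟩
  rcases List.mem_range'_1.mp (List.mem_filter.mp hj).1 with ⟨_, hjr⟩
  exact (pvGood_iff arr lt r i).mp hig j hij (by omega)

-- pop-from-the-back loop = filter, on a list where kept-ness propagates to the right
lemma pvPopRev_eq_filter (arr : List Int) (x : Int) (lt : Int → Int → Bool) :
    ∀ xs : List Nat,
      xs.Pairwise (fun i j => lt (arr.getD i 0) x = false → lt (arr.getD j 0) x = false) →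
      pvPopRev arr x lt xs = xs.filter (fun i => !(lt (arr.getD i 0) x)) := by
  intro xs hp
  induction xs with
  | nil => rfl
  | cons i t ih =>
    rcases List.pairwise_cons.mp hp with ⟨hh, ht⟩
    by_cases hi : lt (arr.getD i 0) x = true
    · rw [pvPopRev, if_pos hi, ih ht, List.filter_cons_of_neg (by simpa using hi)]
    · simp only [Bool.not_eq_true] at hi
      have hall : ∀ j ∈ t, (!(lt (arr.getD j 0) x)) = true := by
        intro j hj; rw [hh j hj hi]; rfl
      rw [pvPopRev, if_neg (by simpa using hi), List.filter_cons_of_pos (by simpa using hi),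
        List.filter_eq_self.mpr hall]

-- the push phase at r = s+1 turns the deque for [l, s] into the deque for [l, s+1]
lemma pvCand_push (arr : List Int) (lt : Int → Int → Bool)
    (H1 : ∀ a b c, lt a b = false → lt b c = false → lt a c = false)
    (l s : Nat) (h : l ≤ s) :
    (pvPopRev arr (arr.getD (s+1) 0) lt (pvCand arr lt l s).reverse).reverse ++ [s+1]
      = pvCand arr lt l (s+1) := by
  have hpw := pvCand_pairwise arr lt l s
  have hrev : (pvCand arr lt l s).reverse.Pairwise
      (fun i j => lt (arr.getD i 0) (arr.getD (s+1) 0) = false →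
                  lt (arr.getD j 0) (arr.getD (s+1) 0) = false) :=
    List.pairwise_reverse.mpr (hpw.imp (fun hab hkb => H1 _ _ _ hab hkb))
  rw [pvPopRev_eq_filter arr _ lt _ hrev, ← List.filter_reverse, List.reverse_reverse]
  show (pvCand arr lt l s).filter _ ++ [s+1] = _
  have hsplit : List.range' l (s + 1 + 1 - l) = List.range' l (s + 1 - l) ++ [s+1] := by
    have h1 : s + 1 + 1 - l = (s + 1 - l) + 1 := by omega
    have h2 : l + (s + 1 - l) = s + 1 := by omega
    rw [h1, List.range'_1_concat, h2]
  unfold pvCand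
  rw [hsplit, List.filter_append]
  have h2 : List.filter (pvGood arr lt (s+1)) [s+1] = [s+1] := by
    simp [pvGood_self]
  rw [h2, List.filter_filter]
  congr 1
  refine (List.filter_congr ?_).symm
  intro i hi
  rcases List.mem_range'_1.mp hi with ⟨hi1, hi2⟩
  rw [Bool.eq_iff_iff]
  simp only [Bool.and_eq_true, Bool.not_eq_true', pvGood_iff]
  constructor
  · intro hg
    exact ⟨hg (s+1) (by omega) le_rfl, fun j hj1 hj2 => hg j hj1 (by omega)⟩
  · rintro ⟨hlast, hg⟩ j hj1 hj2
    rcases Nat.lt_or_ge j (s+1) with hj | hj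
    · exact hg j hj1 (by omega)
    · have : j = s + 1 := by omega
      rw [this]; exact hlast

lemma head_filter_first (xs : List Nat) (p : Nat → Bool) (i0 : Nat)
    (h : (xs.filter p).head? = some i0) (hs : xs.Pairwise (· < ·)) :
    ∀ i ∈ xs, i < i0 → p i = false := by
  induction xs with
  | nil => simp at h
  | cons a t ih =>
    rcases List.pairwise_cons.mp hs with ⟨hha, hta⟩
    intro i hi hlt
    cases pa : p a with
    | true =>
      rw [List.filter_cons_of_pos pa] at h
      simp only [List.head?_cons, Option.some.injEq] at h
      subst h
      rcases List.mem_cons.mp hi with rfl | hit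
      · omega
      · exact absurd (hha i hit) (by omega)
    | false =>
      rw [List.filter_cons_of_neg (by simp [pa])] at h
      rcases List.mem_cons.mp hi with rfl | hit
      · exact pa
      · exact ih h hta i hit hlt

-- the deque front is an extremal index of the window
lemma pvCand_head (arr : List Int) (lt : Int → Int → Bool)
    (Hirr : ∀ a, lt a a = false)
    (H2 : ∀ a b c, lt a c = true → lt b c = false → lt b a = false)
    (l r : Nat) (h : l ≤ r) :
    ∃ i0, (pvCand arr lt l r).headD 0 = i0 ∧ l ≤ i0 ∧ i0 ≤ r ∧
      ∀ i, l ≤ i → i ≤ r → lt (arr.getD i0 0) (arr.getD i 0) = false := by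
  have hrmem : r ∈ pvCand arr lt l r :=
    (mem_pvCand arr lt l r r h).mpr ⟨h, le_rfl, pvGood_self arr lt r⟩
  cases hh : (pvCand arr lt l r).head? with
  | none =>
    rw [List.head?_eq_none_iff] at hh
    rw [hh] at hrmem; simp at hrmem
  | some i0 =>
    have hmem : i0 ∈ pvCand arr lt l r := List.mem_of_mem_head? hh
    rcases (mem_pvCand arr lt l r i0 h).mp hmem with ⟨h1, h2, hg⟩
    have hup : ∀ i, i0 ≤ i → i ≤ r → lt (arr.getD i0 0) (arr.getD i 0) = false := by
      intro i hi1 hi2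
      rcases Nat.eq_or_lt_of_le hi1 with rfl | hlt'
      · exact Hirr _
      · exact (pvGood_iff arr lt r i0).mp hg i hlt' hi2
    have key : ∀ d i, l ≤ i → i ≤ r → r - i ≤ d →
        lt (arr.getD i0 0) (arr.getD i 0) = false := by
      intro d
      induction d with
      | zero =>
        intro i hi1 hi2 hi3
        have : i = r := by omega
        subst this
        exact hup i h2 le_rfl
      | succ d ih =>
        intro i hi1 hi2 hi3
        rcases Nat.lt_or_ge i i0 with hlt' | hge
        · have hfail : pvGood arr lt r i = false :=
            head_filter_first (List.range' l (r + 1 - l)) (pvGood arr lt r) i0 hh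
              (List.pairwise_lt_range' ..) i (List.mem_range'_1.mpr ⟨hi1, by omega⟩) hlt'
          have hnot : ¬ (∀ j, i < j → j ≤ r → lt (arr.getD i 0) (arr.getD j 0) = false) := by
            rw [← pvGood_iff arr lt r i, hfail]; simp
          push Not at hnot
          rcases hnot with ⟨j, hj1, hj2, hj3⟩
          have hj3' : lt (arr.getD i 0) (arr.getD j 0) = true := by
            cases e : lt (arr.getD i 0) (arr.getD j 0)
            · exact absurd e hj3
            · rfl
          have hj0 : lt (arr.getD i0 0) (arr.getD j 0) = false :=
            ih j (by omega) hj2 (by omega)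
          exact H2 _ _ _ hj3' hj0
        · exact hup i hge hi2
    exact ⟨i0, by rw [List.headD_eq_head?_getD, hh]; rfl, h1, h2,
      fun i hi1 hi2 => key r i hi1 hi2 (by omega)⟩

-- popping the front when it equals l turns the deque for [l, r] into the deque for [l+1, r]
lemma pvCand_pop (arr : List Int) (lt : Int → Int → Bool) (l r : Nat) (h : l ≤ r) :
    (if (pvCand arr lt l r).headD 0 = l then (pvCand arr lt l r).tail else pvCand arr lt l r)
      = pvCand arr lt (l+1) r := by
  have hsplit : pvCand arr lt l r
      = List.filter (pvGood arr lt r) [l] ++ pvCand arr lt (l+1) r := by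
    unfold pvCand
    have h1 : r + 1 - l = (r - l) + 1 := by omega
    have h2 : r + 1 - (l + 1) = r - l := by omega
    rw [h1, List.range'_succ, h2, ← List.singleton_append, List.filter_append]
  cases hg : pvGood arr lt r l with
  | true =>
    rw [hsplit] at *
    rw [List.filter_cons_of_pos hg]
    simp
  | false =>
    have hlr : l < r := by
      rcases Nat.eq_or_lt_of_le h with rfl | hlt
      · rw [pvGood_self] at hg; cases hg
      · exact hlt
    rw [hsplit, show List.filter (pvGood arr lt r) [l] = [] by simp [hg], List.nil_append]
    have hrmem : r ∈ pvCand arr lt (l+1) r :=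
      (mem_pvCand arr lt (l+1) r r (by omega)).mpr ⟨by omega, le_rfl, pvGood_self arr lt r⟩
    cases hh : (pvCand arr lt (l+1) r).head? with
    | none =>
      rw [List.head?_eq_none_iff] at hh
      rw [hh] at hrmem; simp at hrmem
    | some h0 =>
      have hmem : h0 ∈ pvCand arr lt (l+1) r := List.mem_of_mem_head? hh
      have hge : l + 1 ≤ h0 := ((mem_pvCand arr lt (l+1) r h0 (by omega)).mp hmem).1
      rw [List.headD_eq_head?_getD, hh]
      simp only [Option.getD_some]
      rw [if_neg (by omega)]

lemma pvWin_eq (arr : List Int) (l r : Nat) :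
    pvWin arr l r = (arr.drop l).take (r + 1 - l) := by
  unfold pvWin
  have h1 : ((r : Nat) : Int) + 1 = (((r+1 : Nat)) : Int) := by push_cast; ring
  rw [h1, PySem.List.slice_natCast]

lemma getD_mem_pvWin (arr : List Int) (l r i : Nat)
    (hl : l ≤ i) (hr : i ≤ r) (hn : i < arr.length) :
    arr.getD i 0 ∈ pvWin arr l r := by
  rw [pvWin_eq]
  have hlen : i - l < ((arr.drop l).take (r + 1 - l)).length := by
    simp only [List.length_take, List.length_drop]
    omega
  have hval : ((arr.drop l).take (r + 1 - l))[i - l]'hlen = arr.getD i 0 := by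
    rw [List.getElem_take, List.getElem_drop]
    have h2 : l + (i - l) = i := by omega
    simp only [h2]
    exact (List.getD_eq_getElem arr 0 hn).symm
  exact hval ▸ List.getElem_mem hlen

lemma pvWin_mem (arr : List Int) (l r : Nat) (y : Int) (h : y ∈ pvWin arr l r) :
    ∃ i, l ≤ i ∧ i ≤ r ∧ i < arr.length ∧ y = arr.getD i 0 := by
  rw [pvWin_eq] at h
  rcases List.mem_iff_getElem.mp h with ⟨m, hm, hv⟩
  have hm' := hm
  simp only [List.length_take, List.length_drop] at hm'
  refine ⟨l + m, by omega, by omega, by omega, ?_⟩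
  rw [List.getElem_take, List.getElem_drop] at hv
  rw [← hv]
  exact (List.getD_eq_getElem arr 0 (by omega)).symm

lemma pvMaxVal (arr : List Int) (l r : Nat) (h : l ≤ r) (hn : r < arr.length) :
    arr.getD ((pvCand arr (fun a b => decide (a < b)) l r).headD 0) 0
      = (PySem.List.max? (pvWin arr l r) (fun y => y)).getD 0 := by
  rcases pvCand_head arr (fun a b => decide (a < b))
      (fun a => by simp)
      (fun a b c h1 h2 => by simp only [decide_eq_true_eq, decide_eq_false_iff_not] at *; omega)
      l r h with ⟨i0, hhd, h1, h2, hbound⟩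
  rw [hhd]
  have hwne : arr.getD r 0 ∈ pvWin arr l r := getD_mem_pvWin arr l r r h le_rfl hn
  cases hmax : PySem.List.max? (pvWin arr l r) (fun y => y) with
  | none =>
    rw [PySem.List.max?_eq_none_iff] at hmax
    rw [hmax] at hwne; simp at hwne
  | some m =>
    have hub : ∀ y ∈ pvWin arr l r, y ≤ m := by
      have := PySem.List.max?_isMax hmax; simpa using this
    rcases pvWin_mem arr l r m (PySem.List.max?_mem hmax) with ⟨i, hi1, hi2, hi3, hmv⟩
    have hle1 : m ≤ arr.getD i0 0 := by
      have := hbound i hi1 hi2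
      simp only [decide_eq_false_iff_not] at this
      omega
    have hle2 : arr.getD i0 0 ≤ m := hub _ (getD_mem_pvWin arr l r i0 h1 h2 (by omega))
    show arr.getD i0 0 = (some m).getD 0
    rw [Option.getD_some]
    exact le_antisymm hle2 hle1

lemma pvMinVal (arr : List Int) (l r : Nat) (h : l ≤ r) (hn : r < arr.length) :
    arr.getD ((pvCand arr (fun a b => decide (b < a)) l r).headD 0) 0
      = (PySem.List.min? (pvWin arr l r) (fun y => y)).getD 0 := by
  rcases pvCand_head arr (fun a b => decide (b < a))
      (fun a => by simp)
      (fun a b c h1 h2 => by simp only [decide_eq_true_eq, decide_eq_false_iff_not] at *; omega)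
      l r h with ⟨i0, hhd, h1, h2, hbound⟩
  rw [hhd]
  have hwne : arr.getD r 0 ∈ pvWin arr l r := getD_mem_pvWin arr l r r h le_rfl hn
  cases hmin : PySem.List.min? (pvWin arr l r) (fun y => y) with
  | none =>
    rw [PySem.List.min?_eq_none_iff] at hmin
    rw [hmin] at hwne; simp at hwne
  | some m =>
    have hlb : ∀ y ∈ pvWin arr l r, m ≤ y := by
      have := PySem.List.min?_isMin hmin; simpa using this
    rcases pvWin_mem arr l r m (PySem.List.min?_mem hmin) with ⟨i, hi1, hi2, hi3, hmv⟩
    have hle1 : arr.getD i0 0 ≤ m := by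
      have := hbound i hi1 hi2
      simp only [decide_eq_false_iff_not] at this
      omega
    have hle2 : m ≤ arr.getD i0 0 := hlb _ (getD_mem_pvWin arr l r i0 h1 h2 (by omega))
    show arr.getD i0 0 = (some m).getD 0
    rw [Option.getD_some]
    exact le_antisymm hle1 hle2

lemma pvShrink_eq (arr : List Int) (k : Int) (hk : 0 ≤ k) :
    ∀ (fuel l r : Nat), l ≤ r → r < arr.length →
      pvShrinkA arr k fuel
          (pvCand arr (fun a b => decide (a < b)) l r)
          (pvCand arr (fun a b => decide (b < a)) l r) l
        = (pvCand arr (fun a b => decide (a < b)) (pvShrinkB arr k fuel l r) r,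
           pvCand arr (fun a b => decide (b < a)) (pvShrinkB arr k fuel l r) r,
           pvShrinkB arr k fuel l r)
      ∧ pvShrinkB arr k fuel l r ≤ r := by
  intro fuel
  induction fuel with
  | zero =>
    intro l r h hn
    exact ⟨rfl, h⟩
  | succ fuel ih =>
    intro l r h hn
    have hM := pvMaxVal arr l r h hn
    have hm := pvMinVal arr l r h hn
    unfold pvWin at hM hm
    rw [pvShrinkA, pvShrinkB, ← hM, ← hm]
    by_cases hc : arr.getD ((pvCand arr (fun a b => decide (a < b)) l r).headD 0) 0
        - arr.getD ((pvCand arr (fun a b => decide (b < a)) l r).headD 0) 0 > k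
    · rw [if_pos hc, if_pos hc]
      have hlr : l < r := by
        rcases Nat.eq_or_lt_of_le h with rfl | hlt
        · exfalso
          rw [pvCand_self, pvCand_self] at hc
          simp only [List.headD_cons] at hc
          omega
        · exact hlt
      rw [pvCand_pop arr _ l r h, pvCand_pop arr _ l r h]
      exact ih (l+1) r (by omega) hn
    · rw [if_neg hc, if_neg hc]
      exact ⟨rfl, h⟩

-- the deque contents at the START of iteration m (l is the left pointer then)
def pvDq (arr : List Int) (lt : Int → Int → Bool) (m l : Nat) : List Nat :=
  if m = 0 then [] else pvCand arr lt l (m-1)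

lemma pvDq_push (arr : List Int) (lt : Int → Int → Bool)
    (H1 : ∀ a b c, lt a b = false → lt b c = false → lt a c = false)
    (m l : Nat) (h0 : m = 0 → l = 0) (hs : ∀ s, m = s + 1 → l ≤ s) :
    (pvPopRev arr (arr.getD m 0) lt (pvDq arr lt m l).reverse).reverse ++ [m]
      = pvCand arr lt l m := by
  cases m with
  | zero =>
    rw [h0 rfl, pvCand_self]
    rfl
  | succ t =>
    have he : pvDq arr lt (t+1) l = pvCand arr lt l t := by simp [pvDq]
    rw [he, pvCand_push arr lt H1 l t (hs t rfl)]

lemma pvLoop_eq (arr : List Int) (k : Int) (hk : 0 ≤ k) :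
    ∀ m, m ≤ arr.length →
      ∃ l c, l ≤ m ∧ (m = 0 → l = 0) ∧ (∀ s, m = s + 1 → l ≤ s) ∧
        ((List.range m).foldl
          (fun (st : List Nat × List Nat × Nat × Int) r =>
            let maxd := (pvPopRev arr (arr.getD r 0) (fun a b => decide (a < b)) st.1.reverse).reverse ++ [r]
            let mind := (pvPopRev arr (arr.getD r 0) (fun a b => decide (b < a)) st.2.1.reverse).reverse ++ [r]
            let s := pvShrinkA arr k (r+1) maxd mind st.2.2.1
            (s.1, s.2.1, s.2.2, st.2.2.2 + ((r : Int) - (s.2.2 : Int) + 1)))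
          ([], [], 0, 0))
          = (pvDq arr (fun a b => decide (a < b)) m l,
             pvDq arr (fun a b => decide (b < a)) m l, l, c) ∧
        ((List.range m).foldl
          (fun (st : Nat × Int) r =>
            let l := pvShrinkB arr k (r+1) st.1 r
            (l, st.2 + ((r : Int) - (l : Int) + 1)))
          (0, 0)) = (l, c) := by
  intro m
  induction m with
  | zero =>
    intro _
    exact ⟨0, 0, le_rfl, fun _ => rfl, fun s hs => by omega, rfl, rfl⟩
  | succ m ih =>
    intro hmn
    have hm : m ≤ arr.length := by omega
    have hmlt : m < arr.length := by omega
    rcases ih hm with ⟨l, c, hlm, h0, hs, hA, hB⟩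
    have H1M : ∀ a b c : Int, decide (a < b) = false → decide (b < c) = false →
        decide (a < c) = false := by
      intro a b c h1 h2
      simp only [decide_eq_false_iff_not] at *
      omega
    have H1m : ∀ a b c : Int, decide (b < a) = false → decide (c < b) = false →
        decide (c < a) = false := by
      intro a b c h1 h2
      simp only [decide_eq_false_iff_not] at *
      omega
    have hpM := pvDq_push arr (fun a b => decide (a < b)) H1M m l h0 hs
    have hpm := pvDq_push arr (fun a b => decide (b < a)) H1m m l h0 hs
    have hshr := pvShrink_eq arr k hk (m+1) l m hlm hmlt
    refine ⟨pvShrinkB arr k (m+1) l m, c + ((m : Int) - (pvShrinkB arr k (m+1) l m : Int) + 1),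
      Nat.le_succ_of_le hshr.2, by omega,
      (by intro s hseq; have he : s = m := by omega
          rw [he]; exact hshr.2), ?_, ?_⟩
    · rw [List.range_succ, List.foldl_append, hA]
      simp only [List.foldl_cons, List.foldl_nil]
      rw [hpM, hpm, hshr.1]
      have hd1 : pvDq arr (fun a b => decide (a < b)) (m+1) (pvShrinkB arr k (m+1) l m)
          = pvCand arr (fun a b => decide (a < b)) (pvShrinkB arr k (m+1) l m) m := by
        simp [pvDq]
      have hd2 : pvDq arr (fun a b => decide (b < a)) (m+1) (pvShrinkB arr k (m+1) l m)
          = pvCand arr (fun a b => decide (b < a)) (pvShrinkB arr k (m+1) l m) m := by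
        simp [pvDq]
      rw [hd1, hd2]
    · rw [List.range_succ, List.foldl_append, hB]
      simp only [List.foldl_cons, List.foldl_nil]

-- ===== VERDICT (by name: the statement is the Claim_ definition above) =====
theorem count_at_most_k_spec : Claim_equal_count_at_most_k := by
  intro arr k _ hpre
  unfold Spec_count_at_most_k count_at_most_k count_at_most_k_alt
  rcases hpre with rfl | hk
  · rfl
  · rcases pvLoop_eq arr k hk arr.length le_rfl with ⟨l, c, _, _, _, hA, hB⟩
    rw [hA, hB]
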